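-- pv_equiv track=rewrite | github.com/bhargava-morampalli/rnamodbench | bin/downstream_analysis/run_analysis.py | _expand_positions_by_window
-- ===== SOURCE A (Python) =====
-- from typing import Dict, List, Optional, Set, Tuple
--
-- def _expand_positions_by_window(
--     ground_truth_positions: Set[int],
--     window_size: int,
--     eval_start: int,
--     eval_end: Optional[int] = None,
-- ) -> Set[int]:
--     if not ground_truth_positions:
--         return set()
--
--     if eval_end is None:
--         eval_end = int(eval_start)
--         eval_start = 1
--
--     expanded: Set[int] = set()
--     for pos in ground_truth_positions:
--         p = int(pos)
--         for offset in range(-int(window_size), int(window_size) + 1):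
--             q = p + offset
--             if int(eval_start) <= q <= int(eval_end):
--                 expanded.add(q)
--     return expanded
-- ===== SOURCE B (Python) =====
-- def _emit_gaps(covered, cur, hi):
--     # ascending elements of [cur, hi] not inside any interval of `covered`
--     # (covered: sorted, disjoint, non-adjacent inclusive intervals)
--     if not covered:
--         return list(range(cur, hi + 1))
--     (a, b), rest = covered[0], covered[1:]
--     if b < cur:
--         return _emit_gaps(rest, cur, hi)
--     if hi < a:
--         return list(range(cur, hi + 1))
--     return list(range(cur, min(a - 1, hi) + 1)) + _emit_gaps(rest, max(cur, b + 1), hi)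
--
--
-- def _insert_interval(covered, lo, hi):
--     # insert [lo, hi] merging overlapping/adjacent intervals, keeping the list sorted
--     if not covered:
--         return [(lo, hi)]
--     (a, b), rest = covered[0], covered[1:]
--     if b + 1 < lo:
--         return [(a, b)] + _insert_interval(rest, lo, hi)
--     if hi + 1 < a:
--         return [(lo, hi)] + covered
--     return _insert_interval(rest, min(a, lo), max(b, hi))
--
--
-- def _expand_positions_by_window(
--     ground_truth_positions,
--     window_size,
--     eval_start,
--     eval_end=None,
-- ):
--     if eval_end is None:
--         lo_b, hi_b = 1, int(eval_start)
--     else: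
--         lo_b, hi_b = int(eval_start), int(eval_end)
--     w = int(window_size)
--     covered = []  # union of windows seen so far, as disjoint sorted intervals
--     out = []
--     for pos in ground_truth_positions:
--         lo = max(int(pos) - w, lo_b)
--         hi = min(int(pos) + w, hi_b)
--         if lo <= hi:
--             out += _emit_gaps(covered, lo, hi)
--             covered = _insert_interval(covered, lo, hi)
--     return set(out)
-- ===== Notes on version B (the rewrite author's own statement) =====
-- stated objective: faster
-- what changed: Replaces A's per-position scan of all 2*W+1 offsets with a per-offset membership test by an interval-union algorithm: it maintains the windows seen so far as a sorted list of disjoint merged intervals, emits for each new clamped window only the uncovered gap segments, and never touches an element twice.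
import Mathlib
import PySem

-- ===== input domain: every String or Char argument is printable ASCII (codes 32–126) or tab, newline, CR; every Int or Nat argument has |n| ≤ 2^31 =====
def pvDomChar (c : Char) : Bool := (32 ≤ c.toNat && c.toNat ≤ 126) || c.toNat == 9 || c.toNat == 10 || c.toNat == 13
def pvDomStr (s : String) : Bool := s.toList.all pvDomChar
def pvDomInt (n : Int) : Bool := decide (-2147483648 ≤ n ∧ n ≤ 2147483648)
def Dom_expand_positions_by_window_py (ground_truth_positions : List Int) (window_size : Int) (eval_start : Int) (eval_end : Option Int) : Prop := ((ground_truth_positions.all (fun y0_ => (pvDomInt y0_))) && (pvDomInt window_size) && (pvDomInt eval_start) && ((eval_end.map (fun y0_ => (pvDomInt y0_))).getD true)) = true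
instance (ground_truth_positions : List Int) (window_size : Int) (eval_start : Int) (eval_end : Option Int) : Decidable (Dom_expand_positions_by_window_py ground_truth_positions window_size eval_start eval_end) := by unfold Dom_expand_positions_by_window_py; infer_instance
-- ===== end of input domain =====

-- B replaces A's scan of every offset in [-W, W] (with a per-element membership test into the
-- growing set) by an interval-union algorithm: the windows seen so far are kept as a sorted list
-- of disjoint merged intervals, and each new clamped window emits only its uncovered gap segments.

-- ===== PORT A =====
def expand_positions_by_window_py (ground_truth_positions : List Int) (window_size : Int) (eval_start : Int) (eval_end : Option Int) : List Int :=
  if ground_truth_positions = [] then []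
  else
    let se : Int × Int := match eval_end with
      | none => (1, eval_start)
      | some e' => (eval_start, e')
    ground_truth_positions.foldl (fun expanded p =>
      (PySem.List.pyRange (-window_size) (window_size + 1) 1).foldl (fun expanded offset =>
        let q := p + offset
        if se.1 ≤ q ∧ q ≤ se.2 then PySem.Set.add expanded q else expanded) expanded) []

-- ===== PORT B =====
-- ascending elements of [cur, hi] not inside any interval of `covered` (sorted disjoint intervals)
def pvEmitGaps : List (Int × Int) → Int → Int → List Int
  | [], cur, hi => PySem.List.pyRange cur (hi + 1) 1
  | (a, b) :: rest, cur, hi =>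
    if b < cur then pvEmitGaps rest cur hi
    else if hi < a then PySem.List.pyRange cur (hi + 1) 1
    else PySem.List.pyRange cur (min (a - 1) hi + 1) 1 ++ pvEmitGaps rest (max cur (b + 1)) hi

-- insert [lo, hi] merging overlapping/adjacent intervals, keeping the list sorted
def pvInsertIv : List (Int × Int) → Int → Int → List (Int × Int)
  | [], lo, hi => [(lo, hi)]
  | (a, b) :: rest, lo, hi =>
    if b + 1 < lo then (a, b) :: pvInsertIv rest lo hi
    else if hi + 1 < a then (lo, hi) :: (a, b) :: rest
    else pvInsertIv rest (min a lo) (max b hi)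

def expand_positions_by_window_py_alt (ground_truth_positions : List Int) (window_size : Int) (eval_start : Int) (eval_end : Option Int) : List Int :=
  let se : Int × Int := match eval_end with
    | none => (1, eval_start)
    | some e' => (eval_start, e')
  let res := ground_truth_positions.foldl (fun (st : List (Int × Int) × List Int) p =>
      let lo := max (p - window_size) se.1
      let hi := min (p + window_size) se.2
      if lo ≤ hi then (pvInsertIv st.1 lo hi, st.2 ++ pvEmitGaps st.1 lo hi) else st)
    ([], [])
  PySem.Set.ofList res.2

-- ===== PRECONDITION & SPEC =====
def Spec_expand_positions_by_window_py (ground_truth_positions : List Int) (window_size : Int) (eval_start : Int) (eval_end : Option Int) (out : List Int) : Prop := out = expand_positions_by_window_py_alt ground_truth_positions window_size eval_start eval_end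
instance (ground_truth_positions : List Int) (window_size : Int) (eval_start : Int) (eval_end : Option Int) (out : List Int) : Decidable (Spec_expand_positions_by_window_py ground_truth_positions window_size eval_start eval_end out) := by unfold Spec_expand_positions_by_window_py; infer_instance

-- ===== CLAIM (what is proved, stated in full; the proofs are below) =====
def Claim_equal_expand_positions_by_window_py : Prop := ∀ (ground_truth_positions : List Int) (window_size : Int) (eval_start : Int) (eval_end : Option Int), Dom_expand_positions_by_window_py ground_truth_positions window_size eval_start eval_end → Spec_expand_positions_by_window_py ground_truth_positions window_size eval_start eval_end (expand_positions_by_window_py ground_truth_positions window_size eval_start eval_end)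

-- ===== LEMMAS AND PROOFS =====

-- q lies in some interval of cov
def pvInCov (cov : List (Int × Int)) (q : Int) : Bool := cov.any (fun x => decide (x.1 ≤ q ∧ q ≤ x.2))

-- cov is a sorted list of nonempty, pairwise disjoint and non-adjacent intervals
def pvInv (cov : List (Int × Int)) : Prop :=
  cov.Pairwise (fun x y => x.2 + 1 < y.1) ∧ ∀ x ∈ cov, x.1 ≤ x.2

theorem pv_inCov_cons (a b q : Int) (tl : List (Int × Int)) :
    pvInCov ((a, b) :: tl) q = (decide (a ≤ q ∧ q ≤ b) || pvInCov tl q) := by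
  simp [pvInCov]

theorem pv_inCov_false_of_lt_left (cov : List (Int × Int)) (x : Int)
    (h : ∀ y ∈ cov, x < y.1) : pvInCov cov x = false := by
  simp only [pvInCov, List.any_eq_false]
  intro y hy
  have := h y hy
  simp only [decide_eq_true_eq]
  omega

theorem pv_inv_tail (a b : Int) (tl : List (Int × Int)) (h : pvInv ((a, b) :: tl)) :
    pvInv tl := ⟨(List.pairwise_cons.mp h.1).2, fun y hy => h.2 y (List.mem_cons_of_mem _ hy)⟩

theorem pv_emit_mem (cov : List (Int × Int)) : pvInv cov → ∀ (cur hi x : Int),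
    (x ∈ pvEmitGaps cov cur hi ↔ cur ≤ x ∧ x ≤ hi ∧ pvInCov cov x = false) := by
  induction cov with
  | nil =>
    intro _ cur hi x
    simp only [pvEmitGaps, PySem.List.mem_pyRange_one, pvInCov, List.any_nil]
    constructor
    · rintro ⟨h1, h2⟩; exact ⟨h1, by omega, trivial⟩
    · rintro ⟨h1, h2, _⟩; exact ⟨h1, by omega⟩
  | cons hd tl ih =>
    obtain ⟨a, b⟩ := hd
    intro hInv cur hi x
    have hab : a ≤ b := hInv.2 (a, b) (List.mem_cons_self ..)
    have hsep : ∀ y ∈ tl, b + 1 < y.1 := (List.pairwise_cons.mp hInv.1).1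
    have ihm := ih (pv_inv_tail a b tl hInv)
    simp only [pvEmitGaps]
    by_cases h1 : b < cur
    · rw [if_pos h1, ihm cur hi x, pv_inCov_cons]
      simp only [Bool.or_eq_false_iff, decide_eq_false_iff_not]
      constructor
      · rintro ⟨hc, hh, hr⟩; exact ⟨hc, hh, by omega, hr⟩
      · rintro ⟨hc, hh, _, hr⟩; exact ⟨hc, hh, hr⟩
    · rw [if_neg h1]
      by_cases h2 : hi < a
      · rw [if_pos h2, PySem.List.mem_pyRange_one]
        constructor
        · rintro ⟨hc, hh⟩
          refine ⟨hc, by omega, ?_⟩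
          rw [pv_inCov_cons]
          simp only [Bool.or_eq_false_iff, decide_eq_false_iff_not]
          exact ⟨by omega, pv_inCov_false_of_lt_left tl x
            (fun y hy => by have := hsep y hy; omega)⟩
        · rintro ⟨hc, hh, _⟩; exact ⟨hc, by omega⟩
      · rw [if_neg h2, List.mem_append, PySem.List.mem_pyRange_one,
          ihm (max cur (b + 1)) hi x, pv_inCov_cons]
        simp only [Bool.or_eq_false_iff, decide_eq_false_iff_not]
        constructor
        · rintro (⟨hc, hx⟩ | ⟨hc, hx, hr⟩)
          · exact ⟨hc, by omega, by omega, pv_inCov_false_of_lt_left tl x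
              (fun y hy => by have := hsep y hy; omega)⟩
          · exact ⟨by omega, hx, by omega, hr⟩
        · rintro ⟨hc, hh, hhead, hr⟩
          by_cases hxa : x < a
          · exact Or.inl ⟨hc, by omega⟩
          · exact Or.inr ⟨by omega, hh, hr⟩

theorem pv_emit_pairwise (cov : List (Int × Int)) : pvInv cov → ∀ (cur hi : Int),
    (pvEmitGaps cov cur hi).Pairwise (· < ·) := by
  induction cov with
  | nil => intro _ cur hi; exact PySem.List.pairwise_lt_pyRange_one ..
  | cons hd tl ih =>
    obtain ⟨a, b⟩ := hd
    intro hInv cur hi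
    have hab : a ≤ b := hInv.2 (a, b) (List.mem_cons_self ..)
    have htl := pv_inv_tail a b tl hInv
    simp only [pvEmitGaps]
    by_cases h1 : b < cur
    · rw [if_pos h1]; exact ih htl cur hi
    · rw [if_neg h1]
      by_cases h2 : hi < a
      · rw [if_pos h2]; exact PySem.List.pairwise_lt_pyRange_one ..
      · rw [if_neg h2]
        rw [List.pairwise_append]
        refine ⟨PySem.List.pairwise_lt_pyRange_one .., ih htl .., ?_⟩
        intro x hx y hy
        rw [PySem.List.mem_pyRange_one] at hx
        have := ((pv_emit_mem tl htl (max cur (b + 1)) hi y).mp hy).1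
        omega

-- the gap walk is exactly the filtered range
theorem pv_emit_eq_filter (cov : List (Int × Int)) (cur hi : Int) (h : pvInv cov) :
    pvEmitGaps cov cur hi
      = (PySem.List.pyRange cur (hi + 1) 1).filter (fun q => !pvInCov cov q) := by
  have hl : (pvEmitGaps cov cur hi).Pairwise (· < ·) := pv_emit_pairwise cov h cur hi
  have hr : ((PySem.List.pyRange cur (hi + 1) 1).filter (fun q => !pvInCov cov q)).Pairwise (· < ·) :=
    List.Pairwise.filter _ (PySem.List.pairwise_lt_pyRange_one ..)
  have hmem : ∀ x, x ∈ pvEmitGaps cov cur hi ↔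
      x ∈ (PySem.List.pyRange cur (hi + 1) 1).filter (fun q => !pvInCov cov q) := by
    intro x
    rw [pv_emit_mem cov h cur hi x, List.mem_filter, PySem.List.mem_pyRange_one]
    simp only [Bool.not_eq_eq_eq_not]
    constructor
    · rintro ⟨h1, h2, h3⟩; exact ⟨⟨h1, by omega⟩, by simp [h3]⟩
    · rintro ⟨⟨h1, h2⟩, h3⟩; exact ⟨h1, by omega, by simpa using h3⟩
  have hperm : List.Perm (pvEmitGaps cov cur hi)
      ((PySem.List.pyRange cur (hi + 1) 1).filter (fun q => !pvInCov cov q)) :=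
    (List.perm_ext_iff_of_nodup (hl.imp ne_of_lt) (hr.imp ne_of_lt)).mpr hmem
  exact List.Perm.eq_of_pairwise (fun a b _ _ h1 h2 => le_antisymm h1 h2)
    (hl.imp le_of_lt) (hr.imp le_of_lt) hperm

theorem pv_insert_mem (cov : List (Int × Int)) : ∀ (lo hi q : Int), pvInv cov → lo ≤ hi →
    pvInCov (pvInsertIv cov lo hi) q = (pvInCov cov q || decide (lo ≤ q ∧ q ≤ hi)) := by
  induction cov with
  | nil =>
    intro lo hi q _ _
    simp [pvInsertIv, pvInCov]
  | cons hd tl ih =>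
    obtain ⟨a, b⟩ := hd
    intro lo hi q hInv hlh
    have hab : a ≤ b := hInv.2 (a, b) (List.mem_cons_self ..)
    have htl := pv_inv_tail a b tl hInv
    simp only [pvInsertIv]
    by_cases h1 : b + 1 < lo
    · rw [if_pos h1, pv_inCov_cons, ih lo hi q htl hlh, pv_inCov_cons, Bool.or_assoc]
    · rw [if_neg h1]
      by_cases h2 : hi + 1 < a
      · rw [if_pos h2, pv_inCov_cons, Bool.or_comm]
      · rw [if_neg h2, ih (min a lo) (max b hi) q htl (by omega), pv_inCov_cons]
        cases hq : pvInCov tl q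
        · simp only [Bool.false_or, Bool.or_false, ← Bool.decide_or]
          exact decide_eq_decide.mpr (by constructor <;> (intro h; omega))
        · simp

theorem pv_insert_bound (cov : List (Int × Int)) : ∀ (lo hi c : Int),
    (∀ x ∈ cov, c < x.1) → c < lo → ∀ x ∈ pvInsertIv cov lo hi, c < x.1 := by
  induction cov with
  | nil =>
    intro lo hi c _ hc x hx
    simp only [pvInsertIv, List.mem_singleton] at hx
    subst hx; exact hc
  | cons hd tl ih =>
    obtain ⟨a, b⟩ := hd
    intro lo hi c hall hc x hx
    simp only [pvInsertIv] at hx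
    by_cases h1 : b + 1 < lo
    · rw [if_pos h1] at hx
      rcases List.mem_cons.mp hx with h | h
      · subst h; exact hall (a, b) (List.mem_cons_self ..)
      · exact ih lo hi c (fun y hy => hall y (List.mem_cons_of_mem _ hy)) hc x h
    · rw [if_neg h1] at hx
      by_cases h2 : hi + 1 < a
      · rw [if_pos h2] at hx
        rcases List.mem_cons.mp hx with h | h
        · subst h; exact hc
        · exact hall x h
      · rw [if_neg h2] at hx
        have ha : c < a := hall (a, b) (List.mem_cons_self ..)
        exact ih (min a lo) (max b hi) c (fun y hy => hall y (List.mem_cons_of_mem _ hy))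
          (by omega) x hx

theorem pv_insert_inv (cov : List (Int × Int)) : ∀ (lo hi : Int), pvInv cov → lo ≤ hi →
    pvInv (pvInsertIv cov lo hi) := by
  induction cov with
  | nil =>
    intro lo hi _ hlh
    exact ⟨List.pairwise_singleton .., by
      intro x hx; simp only [pvInsertIv, List.mem_singleton] at hx; subst hx; exact hlh⟩
  | cons hd tl ih =>
    obtain ⟨a, b⟩ := hd
    intro lo hi hInv hlh
    have hab : a ≤ b := hInv.2 (a, b) (List.mem_cons_self ..)
    have hsep : ∀ y ∈ tl, b + 1 < y.1 := (List.pairwise_cons.mp hInv.1).1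
    have htl := pv_inv_tail a b tl hInv
    simp only [pvInsertIv]
    by_cases h1 : b + 1 < lo
    · rw [if_pos h1]
      have hrec := ih lo hi htl hlh
      refine ⟨List.pairwise_cons.mpr ⟨?_, hrec.1⟩, ?_⟩
      · exact pv_insert_bound tl lo hi (b + 1) (fun y hy => hsep y hy) h1
      · intro x hx
        rcases List.mem_cons.mp hx with h | h
        · subst h; exact hab
        · exact hrec.2 x h
    · rw [if_neg h1]
      by_cases h2 : hi + 1 < a
      · rw [if_pos h2]
        refine ⟨List.pairwise_cons.mpr ⟨?_, hInv.1⟩, ?_⟩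
        · intro y hy
          rcases List.mem_cons.mp hy with h | h
          · subst h; omega
          · have := hsep y h; omega
        · intro x hx
          rcases List.mem_cons.mp hx with h | h
          · subst h; exact hlh
          · exact hInv.2 x h
      · rw [if_neg h2]
        exact ih (min a lo) (max b hi) htl (by omega)


-- A's filtered walk over [a, b) equals a plain add-walk over the clamped range.
theorem pv_filter_range_fold (s e : Int) : ∀ (a b : Int) (acc : List Int),
    (PySem.List.pyRange a b 1).foldl
      (fun acc q => if s ≤ q ∧ q ≤ e then PySem.Set.add acc q else acc) acc
    = (PySem.List.pyRange (max a s) (min (b - 1) e + 1) 1).foldl PySem.Set.add acc := by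
  intro a b
  by_cases hab : a < b
  · induction h : (b - a).toNat generalizing a with
    | zero => omega
    | succ n ih =>
      intro acc
      rw [PySem.List.pyRange_one_cons hab]
      by_cases hcons : a + 1 < b
      · have hrec := fun acc => ih (a + 1) hcons (by omega) acc
        simp only [List.foldl_cons, hrec]
        by_cases hs : s ≤ a
        · by_cases he : a ≤ e
          · have h1 : max a s = a := by omega
            have h2 : max (a + 1) s = a + 1 := by omega
            have h3 : a < min (b - 1) e + 1 := by omega
            rw [h1, h2, if_pos ⟨hs, he⟩, PySem.List.pyRange_one_cons h3, List.foldl_cons]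
          · have h1 : min (b - 1) e + 1 - max (a + 1) s ≤ 0 := by omega
            have h2 : min (b - 1) e + 1 - max a s ≤ 0 := by omega
            rw [if_neg (by omega), PySem.List.pyRange_one, PySem.List.pyRange_one,
              Int.toNat_eq_zero.mpr h1, Int.toNat_eq_zero.mpr h2]
            simp
        · have h1 : max a s = s := by omega
          have h2 : max (a + 1) s = s := by omega
          rw [if_neg (by omega), h1, h2]
      · have hb : b = a + 1 := by omega
        subst hb
        simp only [show (a : Int) + 1 - 1 = a from by ring]
        rw [PySem.List.pyRange_one, Int.toNat_eq_zero.mpr (by omega)]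
        simp only [List.range_zero, List.map_nil, List.foldl_nil, List.foldl_cons]
        by_cases hs : s ≤ a
        · by_cases he : a ≤ e
          · have h1 : max a s = a := by omega
            have h3 : a < min a e + 1 := by omega
            have h4 : min a e + 1 - (a + 1) ≤ 0 := by omega
            rw [if_pos ⟨hs, he⟩, h1, PySem.List.pyRange_one_cons h3,
              PySem.List.pyRange_one, Int.toNat_eq_zero.mpr h4]
            simp
          · rw [if_neg (by omega), PySem.List.pyRange_one,
              Int.toNat_eq_zero.mpr (by omega)]
            simp
        · rw [if_neg (by omega), PySem.List.pyRange_one,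
            Int.toNat_eq_zero.mpr (by omega)]
          simp
  · intro acc
    rw [PySem.List.pyRange_one, PySem.List.pyRange_one,
      Int.toNat_eq_zero.mpr (by omega), Int.toNat_eq_zero.mpr (by omega)]
    simp

-- shifting A's offset range by p
theorem pv_shift_fold (s e p w : Int) (acc : List Int) :
    (PySem.List.pyRange (-w) (w + 1) 1).foldl
      (fun acc off => if s ≤ p + off ∧ p + off ≤ e then PySem.Set.add acc (p + off) else acc) acc
    = (PySem.List.pyRange (p - w) (p + w + 1) 1).foldl
      (fun acc q => if s ≤ q ∧ q ≤ e then PySem.Set.add acc q else acc) acc := by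
  rw [PySem.List.pyRange_one, PySem.List.pyRange_one, List.foldl_map, List.foldl_map]
  have hn : (w + 1 - -w) = (p + w + 1 - (p - w)) := by ring
  rw [hn]
  congr 1
  funext acc k
  have : p + (-w + ↑k) = p - w + ↑k := by ring
  rw [this]

-- A's filtered offset walk is Set.update with the clamped range (proved for A's port shape)
theorem pv_inner_step (s e p w : Int) (acc : List Int) :
    (PySem.List.pyRange (-w) (w + 1) 1).foldl
      (fun acc off => if s ≤ p + off ∧ p + off ≤ e then PySem.Set.add acc (p + off) else acc) acc
    = PySem.Set.update acc (PySem.List.pyRange (max (p - w) s) (min (p + w) e + 1) 1) := by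
  rw [pv_shift_fold, pv_filter_range_fold]
  have : p + w + 1 - 1 = p + w := by ring
  rw [this]
  rfl

-- one A step on a clean state is "append the gaps"
theorem pv_step (cov : List (Int × Int)) (out : List Int) (lo hi : Int)
    (hInv : pvInv cov) (hC : ∀ q, pvInCov cov q = out.contains q) :
    PySem.Set.update out (PySem.List.pyRange lo (hi + 1) 1)
      = out ++ pvEmitGaps cov lo hi := by
  rw [PySem.Set.update_eq_append_filter,
    PySem.Set.ofList_eq_self_of_nodup _ (PySem.List.nodup_pyRange_one ..),
    pv_emit_eq_filter cov lo hi hInv]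
  congr 1
  apply List.filter_congr
  intro q _
  rw [PySem.Set.contains_eq_listContains, ← hC q]

-- the main loop invariant
theorem pv_main (w s e : Int) : ∀ (gts : List Int) (cov : List (Int × Int)) (out : List Int),
    pvInv cov → out.Nodup → (∀ q, pvInCov cov q = out.contains q) →
    (gts.foldl (fun expanded p =>
        PySem.Set.update expanded
          (PySem.List.pyRange (max (p - w) s) (min (p + w) e + 1) 1)) out
      = (gts.foldl (fun (st : List (Int × Int) × List Int) p =>
          if max (p - w) s ≤ min (p + w) e then
            (pvInsertIv st.1 (max (p - w) s) (min (p + w) e),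
             st.2 ++ pvEmitGaps st.1 (max (p - w) s) (min (p + w) e))
          else st)
          (cov, out)).2)
    ∧ (gts.foldl (fun expanded p =>
        PySem.Set.update expanded
          (PySem.List.pyRange (max (p - w) s) (min (p + w) e + 1) 1)) out).Nodup := by
  intro gts
  induction gts with
  | nil => intro cov out _ hnd _; exact ⟨rfl, hnd⟩
  | cons p tl ih =>
    intro cov out hInv hnd hC
    simp only [List.foldl_cons]
    by_cases hlh : max (p - w) s ≤ min (p + w) e
    · rw [if_pos hlh, pv_step cov out _ _ hInv hC]
      refine ih (pvInsertIv cov (max (p - w) s) (min (p + w) e))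
        (out ++ pvEmitGaps cov (max (p - w) s) (min (p + w) e))
        (pv_insert_inv cov _ _ hInv hlh) ?_ ?_
      · rw [← pv_step cov out _ _ hInv hC]
        exact PySem.Set.nodup_update out _ hnd
      · intro q
        rw [pv_insert_mem cov _ _ q hInv hlh, hC q, ← pv_step cov out _ _ hInv hC]
        rw [Bool.eq_iff_iff]
        simp only [Bool.or_eq_true, List.contains_iff_mem, decide_eq_true_eq,
          PySem.Set.mem_update, PySem.List.mem_pyRange_one]
        constructor
        · rintro (h | h)
          · exact Or.inl h
          · exact Or.inr ⟨h.1, by omega⟩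
        · rintro (h | h)
          · exact Or.inl h
          · exact Or.inr ⟨h.1, by omega⟩
    · rw [if_neg hlh, PySem.List.pyRange_one_eq_nil (by omega), PySem.Set.update_nil]
      exact ih cov out hInv hnd hC

-- bridging A's literal inner loop to the clamped-range update form
theorem pv_bridge (gts : List Int) (w s e : Int) :
    gts.foldl (fun expanded p =>
      (PySem.List.pyRange (-w) (w + 1) 1).foldl (fun expanded offset =>
        let q := p + offset
        if s ≤ q ∧ q ≤ e then PySem.Set.add expanded q else expanded) expanded) []
    = gts.foldl (fun expanded p =>
        PySem.Set.update expanded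
          (PySem.List.pyRange (max (p - w) s) (min (p + w) e + 1) 1)) [] := by
  congr 1
  funext acc p
  exact pv_inner_step s e p w acc

theorem pv_final (gts : List Int) (w s e : Int) :
    gts.foldl (fun expanded p =>
      (PySem.List.pyRange (-w) (w + 1) 1).foldl (fun expanded offset =>
        let q := p + offset
        if s ≤ q ∧ q ≤ e then PySem.Set.add expanded q else expanded) expanded) []
    = PySem.Set.ofList ((gts.foldl (fun (st : List (Int × Int) × List Int) p =>
        if max (p - w) s ≤ min (p + w) e then
          (pvInsertIv st.1 (max (p - w) s) (min (p + w) e),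
           st.2 ++ pvEmitGaps st.1 (max (p - w) s) (min (p + w) e))
        else st) ([], []))).2 := by
  have h := pv_main w s e gts [] [] ⟨List.Pairwise.nil, by simp⟩ List.nodup_nil
    (fun q => rfl)
  exact (pv_bridge gts w s e).trans
    (h.1.trans (PySem.Set.ofList_eq_self_of_nodup _ (h.1 ▸ h.2)).symm)

-- ===== VERDICT (by name: the statement is the Claim_ definition above) =====
theorem expand_positions_by_window_py_spec : Claim_equal_expand_positions_by_window_py := by
  intro gts w s e _
  unfold Spec_expand_positions_by_window_py expand_positions_by_window_py
    expand_positions_by_window_py_alt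
  by_cases hnil : gts = []
  · subst hnil; rfl
  · rw [if_neg hnil]
    cases e with
    | none => exact pv_final gts w 1 s
    | some e' => exact pv_final gts w s e'
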